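-- pv_equiv track=rewrite | github.com/kahuku/competitive_programming | kattis/periodicstrings.py | periodic
-- ===== SOURCE A (Python) =====
-- def valid(a, b):
--     return a[-1] + a[:-1] == b
--
-- def periodic(s, n):
--     broken = [s[i:i+n] for i in range(0, len(s), n)]
--     prev = broken[0]
--     for seq in broken[1:]:
--         if not valid(prev, seq):
--             return False
--         prev = seq
--     return True
-- ===== SOURCE B (Python) =====
-- def periodic(s, n):
--     m = len(s)
--     if m <= n:
--         return True
--     if m % n:
--         return False
--     return all(s[i] == s[(i % n - i // n) % n] for i in range(m))
-- ===== Notes on version B (the rewrite author's own statement) =====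
-- stated objective: alternative
-- what changed: A materialises the list of n-chunks and walks adjacent pairs checking each chunk is the previous one rotated, with early return; B builds no chunks at all: it rejects non-multiple lengths arithmetically and then checks each character against the first block via the closed-form index (i%n - i//n) % n.
import Mathlib
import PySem

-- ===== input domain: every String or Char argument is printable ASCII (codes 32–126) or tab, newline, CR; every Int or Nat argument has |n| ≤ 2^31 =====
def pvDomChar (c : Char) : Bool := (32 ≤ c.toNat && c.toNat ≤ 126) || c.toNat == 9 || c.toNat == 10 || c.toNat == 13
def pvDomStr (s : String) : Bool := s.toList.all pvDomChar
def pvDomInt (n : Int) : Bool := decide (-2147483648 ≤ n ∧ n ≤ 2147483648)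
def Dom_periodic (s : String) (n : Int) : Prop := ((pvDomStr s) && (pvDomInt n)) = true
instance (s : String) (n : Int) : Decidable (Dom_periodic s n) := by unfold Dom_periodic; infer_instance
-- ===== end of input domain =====

-- B replaces A's chunk-list construction and adjacent-pair rotation walk by a purely arithmetic
-- per-character check against the first block, via the closed-form index (i%n - i//n) % n
-- (objective: alternative algorithm, same cost).

-- ===== PORT A =====
-- valid(a, b): return a[-1] + a[:-1] == b
-- a[-1] raises IndexError on empty a in Python; unreached inside Pre_ (every chunk is nonempty there)
def pvRot (a : List Char) : List Char :=
  match PySem.List.pyGet? a (-1) with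
  | none => []
  | some c => c :: PySem.List.slice a none (some (-1))

def pvValid (a b : List Char) : Bool := pvRot a == b

-- broken = [s[i:i+n] for i in range(0, len(s), n)]
def pvBroken (s : String) (n : Int) : List (List Char) :=
  (PySem.List.pyRange 0 (PySem.Str.len s) n).map
    (fun i => PySem.List.slice s.toList (some i) (some (i + n)))

-- the for-loop over broken[1:] with early return False
def pvLoopA : List Char → List (List Char) → Bool
  | _, [] => true
  | prev, seq :: rest => if !(pvValid prev seq) then false else pvLoopA seq rest

def periodic (s : String) (n : Int) : Bool :=
  let broken := pvBroken s n
  match PySem.List.pyGet? broken 0 with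
  | none => false   -- broken[0] raises IndexError in Python; unreached inside Pre_
  | some prev => pvLoopA prev (PySem.List.slice broken (some 1) none)

-- ===== PORT B =====
def periodic_alt (s : String) (n : Int) : Bool :=
  let m := PySem.Str.len s
  if m ≤ n then true
  else if PySem.Int.mod m n != 0 then false
  else (PySem.List.pyRange 0 m 1).all (fun i =>
    PySem.List.pyGet? s.toList i ==
      PySem.List.pyGet? s.toList
        (PySem.Int.mod (PySem.Int.mod i n - PySem.Int.floordiv i n) n))

-- ===== PRECONDITION & SPEC =====
-- Pre_ excludes exactly the inputs where the Python A raises: empty s (IndexError on broken[0])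
-- and n ≤ 0 (ValueError for n = 0 in range, IndexError on broken[0] for n < 0).
def Pre_periodic (s : String) (n : Int) : Prop := s.toList ≠ [] ∧ 1 ≤ n
instance (s : String) (n : Int) : Decidable (Pre_periodic s n) := by unfold Pre_periodic; infer_instance
def pvWitness_periodic : String × Int := ("abab", 2)

def Spec_periodic (s : String) (n : Int) (out : Bool) : Prop := out = periodic_alt s n
instance (s : String) (n : Int) (out : Bool) : Decidable (Spec_periodic s n out) := by unfold Spec_periodic; infer_instance

-- ===== CLAIM (what is proved, stated in full; the proofs are below) =====
def Claim_equal_periodic : Prop := ∀ (s : String) (n : Int), Dom_periodic s n → Pre_periodic s n → Spec_periodic s n (periodic s n)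

-- ===== LEMMAS AND PROOFS =====

-- k-fold rotation and the expected chunk sequence [a, rot a, rot² a, …] A's chain amounts to
def pvRotIter : Nat → List Char → List Char
  | 0, a => a
  | k+1, a => pvRotIter k (pvRot a)

def pvExpSeq : List Char → Nat → List (List Char)
  | _, 0 => []
  | c, k + 1 => c :: pvExpSeq (pvRot c) k

def pvChunk (l : List Char) (nn k : Nat) : List Char := (l.drop (nn*k)).take nn

theorem pvRot_eq (a : List Char) (h : a ≠ []) : pvRot a = a.getLast h :: a.dropLast := by
  unfold pvRot
  rw [PySem.List.pyGet?_neg_one, List.getLast?_eq_some_getLast h, PySem.List.slice_to_neg_one]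

theorem pvRot_length (a : List Char) (h : a ≠ []) : (pvRot a).length = a.length := by
  have := List.length_pos_iff.mpr h
  rw [pvRot_eq a h]
  simp [List.length_dropLast]
  omega

theorem pvRotIter_length (k : Nat) : ∀ (a : List Char), a ≠ [] → (pvRotIter k a).length = a.length := by
  induction k with
  | zero => intro a _; rfl
  | succ k ih =>
      intro a h
      have h2 : pvRot a ≠ [] := by
        rw [pvRot_eq a h]; simp
      simp only [pvRotIter]
      rw [ih _ h2, pvRot_length a h]

theorem pvExpSeq_length (K : Nat) : ∀ (a : List Char), (pvExpSeq a K).length = K := by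
  induction K with
  | zero => intro a; rfl
  | succ K ih => intro a; simp [pvExpSeq, ih]

theorem pvExpSeq_getElem? (K : Nat) : ∀ (a : List Char) (k : Nat), k < K →
    (pvExpSeq a K)[k]? = some (pvRotIter k a) := by
  induction K with
  | zero => omega
  | succ K ih =>
      intro a k hk
      cases k with
      | zero => simp [pvExpSeq, pvRotIter]
      | succ k => simpa [pvExpSeq, pvRotIter] using ih (pvRot a) k (by omega)

-- the central index formula: the j-th character of rotᵏ a is a[(j - k) mod |a|]
theorem pvRotIter_getElem? (nn : Nat) (hnn : 0 < nn) (k : Nat) : ∀ (a : List Char),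
    a.length = nn → ∀ (j : Nat), j < nn →
    (pvRotIter k a)[j]? = a[(((j : Int) - k) % (nn : Int)).toNat]? := by
  induction k with
  | zero =>
      intro a ha j hj
      have : ((j : Int)) % (nn : Int) = (j : Int) :=
        Int.emod_eq_of_lt (by omega) (by exact_mod_cast hj)
      simp [pvRotIter, this]
  | succ k ih =>
      intro a ha j hj
      have hane : a ≠ [] := by
        intro h; subst h; simp at ha; omega
      have hrlen : (pvRot a).length = nn := by rw [pvRot_length a hane, ha]
      have step : (pvRotIter (k+1) a)[j]? = (pvRot a)[(((j : Int) - k) % (nn : Int)).toNat]? := by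
        simpa [pvRotIter] using ih (pvRot a) hrlen j hj
      set t : Int := ((j : Int) - k) % (nn : Int) with ht
      have ht0 : 0 ≤ t := Int.emod_nonneg _ (by omega)
      have htlt : t < (nn : Int) := Int.emod_lt_of_pos _ (by omega)
      -- (j - (k+1)) % nn = (t - 1) % nn
      have hcong : ((j : Int) - ((k+1 : Nat) : Int)) % (nn : Int) = (t - 1) % (nn : Int) := by
        have e1 : ((j : Int) - ((k+1 : Nat) : Int)) = ((j : Int) - k) - 1 := by push_cast; ring
        rw [e1, Int.sub_emod ((j:Int) - k) 1, ht, Int.sub_emod (((j:Int) - k) % nn) 1,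
          Int.emod_emod_of_dvd _ (dvd_refl _)]
      rw [step, pvRot_eq a hane]
      by_cases h0 : t = 0
      · have : (t - 1) % (nn : Int) = (nn : Int) - 1 := by
          rw [h0]
          have e2 : ((0:Int) - 1) = ((nn : Int) - 1) - nn * 1 := by ring
          rw [e2, Int.sub_mul_emod_self_left,
            Int.emod_eq_of_lt (by omega) (by omega)]
        rw [hcong, this, h0]
        have hidx : ((nn : Int) - 1).toNat = a.length - 1 := by omega
        simp only [Int.toNat_zero, List.getElem?_cons_zero, hidx]
        rw [← List.getLast?_eq_getElem?, List.getLast?_eq_some_getLast hane]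
      · have : (t - 1) % (nn : Int) = t - 1 := Int.emod_eq_of_lt (by omega) (by omega)
        rw [hcong, this]
        have h2 : t.toNat = (t - 1).toNat + 1 := by omega
        rw [h2]
        simp only [List.getElem?_cons_succ, List.getElem?_dropLast]
        rw [if_pos (by omega)]

-- A's loop compares broken[1:] against the rotation chain
theorem pvLoopA_eq_expSeq (bs : List (List Char)) : ∀ (prev : List Char),
    pvLoopA prev bs = (pvExpSeq (pvRot prev) bs.length == bs) := by
  induction bs with
  | nil => intro prev; simp [pvLoopA, pvExpSeq]
  | cons b rest ih =>
      intro prev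
      simp only [pvLoopA, pvValid, List.length_cons, pvExpSeq]
      by_cases h : pvRot prev = b
      · subst h
        simp [ih]
      · simp [List.cons_beq_cons, beq_eq_false_iff_ne.mpr h]

-- broken, as a chunk list
theorem pvBroken_eq (s : String) (nn : Nat) (hnn : 0 < nn) (hne : s.toList ≠ []) :
    pvBroken s (nn : Int) =
      (List.range ((s.toList.length + nn - 1) / nn)).map (pvChunk s.toList nn) := by
  have hm : 0 < s.toList.length := List.length_pos_iff.mpr hne
  unfold pvBroken
  rw [PySem.Str.len_eq, PySem.List.pyRange_of_pos _ _ (by exact_mod_cast hnn)]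
  rw [if_pos (by exact_mod_cast hm)]
  have hdiv : (((s.toList.length : Int) - 0 + nn - 1) / (nn : Int)).toNat
      = (s.toList.length + nn - 1) / nn := by
    have e : ((s.toList.length : Int) - 0 + nn - 1) = ((s.toList.length + nn - 1 : Nat) : Int) := by
      omega
    rw [e, ← Int.natCast_div, Int.toNat_natCast]
  rw [hdiv, List.map_map]
  apply List.map_congr_left
  intro k _
  show PySem.List.slice s.toList (some (0 + (nn : Int) * k)) (some (0 + (nn : Int) * k + nn)) = _
  have hcast : (0 + (nn : Int) * k) = ((nn * k : Nat) : Int) := by push_cast; ring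
  rw [hcast, PySem.List.slice_natCast_add s.toList (nn*k) nn]
  rfl

-- chunk facts
theorem pvChunk_length (l : List Char) (nn k : Nat) :
    (pvChunk l nn k).length = min nn (l.length - nn * k) := by
  simp [pvChunk]

theorem pvChunk_getElem? (l : List Char) (nn k j : Nat) (hj : j < nn) :
    (pvChunk l nn k)[j]? = l[nn * k + j]? := by
  unfold pvChunk
  rw [List.getElem?_take, if_pos hj, List.getElem?_drop]

-- the divides case: the chain equality IS the per-chunk index condition
theorem pvDiv_iff (l : List Char) (nn q : Nat) (hnn : 0 < nn) (hq : 0 < q)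
    (hm : l.length = nn * q) :
    (pvExpSeq (pvChunk l nn 0) q = (List.range q).map (pvChunk l nn))
      ↔ ∀ k < q, ∀ j < nn, l[nn*k+j]? = l[(((j:Int) - (k:Int)) % (nn:Int)).toNat]? := by
  have hnm : nn ≤ l.length := by rw [hm]; exact Nat.le_mul_of_pos_right nn hq
  have hc0len : (pvChunk l nn 0).length = nn := by
    rw [pvChunk_length]; omega
  have hc0ne : pvChunk l nn 0 ≠ [] := by
    intro h
    rw [h] at hc0len; simp at hc0len; omega
  have hclen : ∀ k < q, (pvChunk l nn k).length = nn := by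
    intro k hk
    rw [pvChunk_length, hm]
    have : nn * (k + 1) ≤ nn * q := Nat.mul_le_mul_left nn hk
    rw [Nat.mul_add, Nat.mul_one] at this
    omega
  have hrotlen : ∀ k, (pvRotIter k (pvChunk l nn 0)).length = nn := fun k => by
    rw [pvRotIter_length k _ hc0ne, hc0len]
  have hrotget : ∀ k, ∀ j < nn,
      (pvRotIter k (pvChunk l nn 0))[j]? = l[(((j:Int) - (k:Int)) % (nn:Int)).toNat]? := by
    intro k j hj
    rw [pvRotIter_getElem? nn hnn k _ hc0len j hj]
    have hv : (((j:Int) - (k:Int)) % (nn:Int)).toNat < nn := by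
      have := Int.emod_lt_of_pos ((j:Int) - (k:Int)) (b := (nn:Int)) (by omega)
      have := Int.emod_nonneg ((j:Int) - (k:Int)) (b := (nn:Int)) (by omega)
      omega
    unfold pvChunk
    rw [Nat.mul_zero, List.drop_zero, List.getElem?_take, if_pos hv]
  constructor
  · intro heq k hk j hj
    have h1 : (pvExpSeq (pvChunk l nn 0) q)[k]? = ((List.range q).map (pvChunk l nn))[k]? := by
      rw [heq]
    rw [pvExpSeq_getElem? q _ k hk, List.getElem?_map, List.getElem?_range hk] at h1
    have h2 : pvRotIter k (pvChunk l nn 0) = pvChunk l nn k := by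
      simpa using h1
    rw [← pvChunk_getElem? l nn k j hj, ← h2, hrotget k j hj]
  · intro hcond
    apply List.ext_getElem?
    intro k
    by_cases hk : k < q
    · rw [pvExpSeq_getElem? q _ k hk, List.getElem?_map, List.getElem?_range hk]
      simp only [Option.map_some]
      congr 1
      apply List.ext_getElem?
      intro j
      by_cases hj : j < nn
      · rw [hrotget k j hj, pvChunk_getElem? l nn k j hj, hcond k hk j hj]
      · rw [List.getElem?_eq_none, List.getElem?_eq_none]
        · rw [hclen k hk]; omega
        · rw [hrotlen k]; omega
    · rw [List.getElem?_eq_none, List.getElem?_eq_none]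
      · simp only [List.length_map, List.length_range]; omega
      · rw [pvExpSeq_length]; omega

-- re-indexing chunks×offsets ↔ flat positions
theorem pvBridge (l : List Char) (nn q : Nat) (hnn : 0 < nn) :
    (∀ k < q, ∀ j < nn, l[nn*k+j]? = l[(((j:Int) - (k:Int)) % (nn:Int)).toNat]?)
      ↔ ∀ i < nn * q,
          l[i]? = l[((((i % nn : Nat):Int) - ((i / nn : Nat):Int)) % (nn:Int)).toNat]? := by
  constructor
  · intro h i hi
    have hj : i % nn < nn := Nat.mod_lt i hnn
    have hk : i / nn < q := (Nat.div_lt_iff_lt_mul hnn).mpr (by rw [Nat.mul_comm]; exact hi)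
    have hi2 : nn * (i / nn) + i % nn = i := Nat.div_add_mod i nn
    have := h (i / nn) hk (i % nn) hj
    rw [hi2] at this
    exact this
  · intro h k hk j hj
    have hlt : nn * k + j < nn * q := by
      have h1 : nn * k + j < nn * (k + 1) := by rw [Nat.mul_add, Nat.mul_one]; omega
      have h2 : nn * (k + 1) ≤ nn * q := Nat.mul_le_mul_left nn hk
      omega
    have := h (nn * k + j) hlt
    rw [Nat.mul_add_div hnn, Nat.mul_add_mod, Nat.div_eq_of_lt hj, Nat.mod_eq_of_lt hj,
      Nat.add_zero] at this
    exact this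

-- ===== VERDICT (by name: the statement is the Claim_ definition above) =====
theorem periodic_spec : Claim_equal_periodic := by
  intro s n _ hpre
  obtain ⟨hne, hn1⟩ := hpre
  unfold Spec_periodic
  lift n to Nat using (by omega) with nn
  have hnn : 0 < nn := by exact_mod_cast hn1
  set l := s.toList with hl
  have hm : 0 < l.length := List.length_pos_iff.mpr hne
  set m : Nat := l.length with hmdef
  set K : Nat := (m + nn - 1) / nn with hK
  -- A's value, normalised
  have hbroken : pvBroken s (nn : Int) = (List.range K).map (pvChunk l nn) :=
    pvBroken_eq s nn hnn hne
  have hK1 : 1 ≤ K := by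
    rw [hK]
    exact (Nat.one_le_div_iff hnn).mpr (by omega)
  have hrange : List.range K = 0 :: (List.range (K - 1)).map Nat.succ := by
    conv_lhs => rw [show K = (K - 1) + 1 by omega]
    rw [List.range_succ_eq_map]
  have hA : periodic s (nn : Int)
      = (pvExpSeq (pvChunk l nn 0) K == (List.range K).map (pvChunk l nn)) := by
    show (match PySem.List.pyGet? (pvBroken s (nn:Int)) 0 with
      | none => false
      | some prev => pvLoopA prev (PySem.List.slice (pvBroken s (nn:Int)) (some 1) none)) = _
    rw [hbroken, hrange]
    simp only [List.map_cons, PySem.List.pyGet?_zero_cons, PySem.List.slice_from_one,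
      List.tail_cons]
    rw [pvLoopA_eq_expSeq]
    have hE : pvExpSeq (pvChunk l nn 0) K
        = pvChunk l nn 0 :: pvExpSeq (pvRot (pvChunk l nn 0)) (K - 1) := by
      conv_lhs => rw [show K = (K - 1) + 1 by omega]
      rfl
    rw [hE, List.cons_beq_cons]
    simp [List.length_map, List.length_range]
  -- B's value, normalised
  have hB : periodic_alt s (nn : Int)
      = (if (m : Int) ≤ (nn : Int) then true
        else if ((m % nn : Nat) : Int) != 0 then false
        else (List.range m).all (fun i =>
          l[i]? == l[((((i % nn : Nat):Int) - ((i / nn : Nat):Int)) % (nn:Int)).toNat]?)) := by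
    simp only [periodic_alt]
    rw [PySem.Str.len_eq, ← hl, ← hmdef, PySem.Int.mod_natCast]
    by_cases hc : (m : Int) ≤ (nn : Int)
    · rw [if_pos hc, if_pos hc]
    · rw [if_neg hc, if_neg hc]
      by_cases hz : (((m % nn : Nat):Int) != 0) = true
      · rw [if_pos hz, if_pos hz]
      · rw [if_neg hz, if_neg hz, PySem.List.pyRange_one]
        simp only [sub_zero, Int.toNat_natCast, List.all_map]
        apply List.all_congr rfl
        intro i
        simp only [Function.comp_apply, zero_add]
        rw [PySem.Int.mod_natCast, PySem.Int.floordiv_natCast,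
          PySem.Int.mod_eq_emod_of_pos (by exact_mod_cast hnn : (0:Int) < (nn:Int)),
          PySem.List.pyGet?_natCast,
          PySem.List.pyGet?_of_nonneg _ (Int.emod_nonneg _ (by omega))]
  rw [hA, hB]
  by_cases h1 : m ≤ nn
  · -- a single chunk: both sides true
    rw [if_pos (by exact_mod_cast h1)]
    have hKeq : K = 1 := by
      rw [hK]
      exact Nat.div_eq_of_lt_le (by omega) (by omega)
    rw [hKeq]
    simp [pvExpSeq, List.range_succ]
  · rw [if_neg (by exact_mod_cast h1)]
    have hqm : nn * (m / nn) + m % nn = m := Nat.div_add_mod m nn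
    have hr : m % nn < nn := Nat.mod_lt m hnn
    by_cases h2 : m % nn = 0
    · -- length a multiple of n: both sides the index condition
      rw [h2]
      simp only [Nat.cast_zero, bne_self_eq_false, Bool.false_eq_true, if_false]
      have hKq : K = m / nn := by
        rw [hK]
        apply Nat.div_eq_of_lt_le
        · rw [Nat.mul_comm]; omega
        · rw [Nat.add_mul, Nat.one_mul, Nat.mul_comm]; omega
      have hq : 0 < m / nn := by
        rcases Nat.eq_zero_or_pos (m / nn) with h | h
        · rw [h] at hqm; omega
        · exact h
      have hmval : l.length = nn * (m / nn) := by omega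
      rw [Bool.eq_iff_iff, beq_iff_eq, List.all_eq_true]
      rw [hKq, pvDiv_iff l nn (m / nn) hnn hq hmval, pvBridge l nn (m / nn) hnn]
      constructor
      · intro h i hi
        have hi' : i < m := List.mem_range.mp hi
        simpa [beq_iff_eq] using h i (by omega)
      · intro h i hi
        simpa [beq_iff_eq] using h i (List.mem_range.mpr (by omega))
    · -- not a multiple: the last chunk is short, both sides false
      have hzz : (((m % nn : Nat) : Int) != 0) = true := by
        rw [bne_iff_ne]
        exact_mod_cast h2
      rw [if_pos hzz]
      rw [beq_eq_false_iff_ne]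
      intro heq
      have hKq : K = m / nn + 1 := by
        rw [hK]
        apply Nat.div_eq_of_lt_le
        · rw [Nat.add_mul, Nat.one_mul, Nat.mul_comm]; omega
        · rw [Nat.add_mul, Nat.add_mul, Nat.one_mul, Nat.mul_comm]; omega
      have hc0len : (pvChunk l nn 0).length = nn := by
        rw [pvChunk_length]; omega
      have hc0ne : pvChunk l nn 0 ≠ [] := by
        intro h
        rw [h] at hc0len; simp at hc0len; omega
      have h3 : (pvExpSeq (pvChunk l nn 0) K)[K-1]?
          = ((List.range K).map (pvChunk l nn))[K-1]? := by rw [heq]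
      rw [pvExpSeq_getElem? K _ (K-1) (by omega), List.getElem?_map,
        List.getElem?_range (by omega)] at h3
      have h4 : pvRotIter (K-1) (pvChunk l nn 0) = pvChunk l nn (K-1) := by
        simpa using h3
      have h5 : (pvRotIter (K-1) (pvChunk l nn 0)).length = nn := by
        rw [pvRotIter_length _ _ hc0ne, hc0len]
      have h6 : (pvChunk l nn (K-1)).length = min nn (m - nn * (K-1)) := pvChunk_length l nn (K-1)
      rw [h4, h6] at h5
      have h7 : K - 1 = m / nn := by omega
      rw [h7] at h5
      omega
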